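-- pv_equiv track=rewrite | github.com/icyJoseph/codejam2018 | solA/solutionA.py | robot_wins
-- ===== SOURCE A (Python) =====
-- def robot_wins(instructions_arr, shield):
--     damage = 1
--     for command in instructions_arr:
--         if command == 'S':
--             shield = shield - damage
--             if shield < 0:
--                 return True
--         if command == 'C':
--             damage += damage
--     return False
-- ===== SOURCE B (Python) =====
-- def robot_wins(instructions_arr, shield):
--     # Horner-style right-to-left pass: `total` is the damage dealt by the
--     # suffix already seen, assuming unit base damage; a 'C' to its left
--     # doubles every hit in that suffix, an 'S' adds one unit hit.
--     total = 0
--     for command in reversed(instructions_arr):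
--         if command == 'C':
--             total *= 2
--         elif command == 'S':
--             total += 1
--     # shield depletion is monotone, so "went negative at some S" == "final
--     # shield negative"; total > 0 records that at least one attack happened.
--     return total > 0 and total > shield
-- ===== Notes on version B (the rewrite author's own statement) =====
-- stated objective: alternative
-- what changed: B replaces A's forward shield simulation (running damage doubled on 'C', early return when shield goes negative) by a reversed Horner-style pass with a single accumulator: each 'S' adds 1 and each 'C' doubles the suffix total, so no damage variable and no shield updates; one final comparison decides the result (depletion is monotone; 'total > 0' records that at least one attack happened).
import Mathlib
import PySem

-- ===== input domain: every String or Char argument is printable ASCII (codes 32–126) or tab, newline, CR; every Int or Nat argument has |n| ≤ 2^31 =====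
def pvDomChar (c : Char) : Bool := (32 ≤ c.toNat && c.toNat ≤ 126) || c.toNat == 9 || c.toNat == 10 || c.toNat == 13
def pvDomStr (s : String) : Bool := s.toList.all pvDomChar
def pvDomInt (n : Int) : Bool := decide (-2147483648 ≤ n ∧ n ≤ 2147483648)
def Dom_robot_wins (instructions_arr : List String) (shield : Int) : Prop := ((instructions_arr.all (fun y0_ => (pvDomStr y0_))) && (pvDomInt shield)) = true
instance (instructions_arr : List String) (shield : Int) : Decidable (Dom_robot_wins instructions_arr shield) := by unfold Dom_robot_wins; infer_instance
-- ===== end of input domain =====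

-- B replaces A's forward shield simulation by a reversed Horner-style accumulation pass and one final comparison (objective: alternative).


-- ===== PORT A =====
-- A's loop with early return, carried as structural recursion over the commands
def robotWinsLoop (cmds : List String) (shield damage : Int) : Bool :=
  match cmds with
  | [] => false
  | command :: rest =>
      let shield1 := if command = "S" then shield - damage else shield
      if command = "S" ∧ shield1 < 0 then true
      else
        let damage1 := if command = "C" then damage + damage else damage
        robotWinsLoop rest shield1 damage1

def robot_wins (instructions_arr : List String) (shield : Int) : Bool :=
  robotWinsLoop instructions_arr shield 1

-- ===== PORT B =====
-- B's reversed Horner pass: 'C' doubles the suffix total, 'S' adds one unit hit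
def robotHorner (total : Int) (command : String) : Int :=
  if command = "C" then 2 * total
  else if command = "S" then total + 1
  else total

def robot_wins_alt (instructions_arr : List String) (shield : Int) : Bool :=
  let total := instructions_arr.reverse.foldl robotHorner 0
  decide (0 < total ∧ shield < total)

-- ===== PRECONDITION & SPEC =====
def Spec_robot_wins (instructions_arr : List String) (shield : Int) (out : Bool) : Prop := out = robot_wins_alt instructions_arr shield
instance (instructions_arr : List String) (shield : Int) (out : Bool) : Decidable (Spec_robot_wins instructions_arr shield out) := by unfold Spec_robot_wins; infer_instance

-- ===== CLAIM (what is proved, stated in full; the proofs are below) =====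
def Claim_equal_robot_wins : Prop := ∀ (instructions_arr : List String) (shield : Int), Dom_robot_wins instructions_arr shield → Spec_robot_wins instructions_arr shield (robot_wins instructions_arr shield)

-- ===== LEMMAS AND PROOFS =====

-- the Horner total is nonnegative
theorem horner_nonneg (cmds : List String) :
    0 ≤ cmds.foldr (fun c t => robotHorner t c) 0 := by
  induction cmds with
  | nil => simp
  | cons c rest ih =>
    rw [List.foldr_cons, robotHorner]
    split_ifs <;> omega

-- key invariant: A's early-return loop with damage d equals one comparison
-- against d times the unit-damage Horner total of the remaining commands
theorem loop_eq_horner (cmds : List String) (shield d : Int) (hd : 0 < d) :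
    robotWinsLoop cmds shield d =
      decide (0 < d * cmds.foldr (fun c t => robotHorner t c) 0 ∧
              shield < d * cmds.foldr (fun c t => robotHorner t c) 0) := by
  induction cmds generalizing shield d with
  | nil => simp [robotWinsLoop]
  | cons c rest ih =>
    have hTr : 0 ≤ rest.foldr (fun c t => robotHorner t c) 0 := horner_nonneg rest
    have hm : 0 ≤ d * rest.foldr (fun c t => robotHorner t c) 0 :=
      mul_nonneg (by omega) hTr
    have hmp : 0 < rest.foldr (fun c t => robotHorner t c) 0 ↔
        0 < d * rest.foldr (fun c t => robotHorner t c) 0 := by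
      constructor
      · exact fun h => mul_pos hd h
      · intro h
        by_contra hn
        have h0 : rest.foldr (fun c t => robotHorner t c) 0 = 0 := by omega
        simp [h0] at h
    rw [List.foldr_cons]
    by_cases hS : c = "S"
    · subst hS
      have e2 : (("S" : String) = "C") = False := by simp
      rw [show robotHorner (rest.foldr (fun c t => robotHorner t c) 0) "S"
          = rest.foldr (fun c t => robotHorner t c) 0 + 1 from by
            rw [robotHorner]; simp only [e2, if_true, if_false]]
      simp only [robotWinsLoop, e2, if_true, if_false, true_and]
      rw [ih (shield - d) d hd, mul_add, mul_one]
      by_cases hneg : shield - d < 0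
      · rw [if_pos hneg]
        have h3 : (0 < d * rest.foldr (fun c t => robotHorner t c) 0 + d ∧
            shield < d * rest.foldr (fun c t => robotHorner t c) 0 + d) := by
          constructor <;> omega
        simp [h3]
      · rw [if_neg hneg]
        congr 1
        simp only [eq_iff_iff]
        omega
    · by_cases hC : c = "C"
      · subst hC
        have e1 : (("C" : String) = "C") = True := by simp
        have e2 : (("C" : String) = "S") = False := by simp
        rw [show robotHorner (rest.foldr (fun c t => robotHorner t c) 0) "C"
            = 2 * rest.foldr (fun c t => robotHorner t c) 0 from by
              rw [robotHorner]; simp only [if_true]]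
        simp only [robotWinsLoop, e2, if_true, if_false, false_and]
        rw [ih shield (d + d) (by omega)]
        have h4 : (d + d) * rest.foldr (fun c t => robotHorner t c) 0
            = d * (2 * rest.foldr (fun c t => robotHorner t c) 0) := by ring
        rw [h4]
      · have e1 : (c = "S") = False := by simp [hS]
        have e2 : (c = "C") = False := by simp [hC]
        rw [show robotHorner (rest.foldr (fun c t => robotHorner t c) 0) c
            = rest.foldr (fun c t => robotHorner t c) 0 from by
              rw [robotHorner]; simp only [e1, e2, if_false]]
        simp only [robotWinsLoop, e1, e2, if_false, false_and]
        exact ih shield d hd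

-- ===== VERDICT (by name: the statement is the Claim_ definition above) =====
theorem robot_wins_spec : Claim_equal_robot_wins := by
  intro arr shield _
  unfold Spec_robot_wins robot_wins robot_wins_alt
  rw [List.foldl_reverse]
  have := loop_eq_horner arr shield 1 (by omega)
  simpa using this
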